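-- pv_equiv track=rewrite | github.com/thealper2/codewars-solutions | 7-kyu/mountains_of_hoiyama.py | mountains_of_hoiyama
-- ===== SOURCE A (Python) =====
-- def mountains_of_hoiyama(width):
--     total = 0
--     layers = (width + 1) // 2
--     for i in range(layers):
--         n = i
--         center = width - i
--         layer = sum(i for i in range(center - n, center + 1))
--         layer_sum = layer * 2 - center
--         total += layer_sum
--
--     return total
-- ===== SOURCE B (Python) =====
-- def mountains_of_hoiyama(width):
--     L = (width + 1) // 2
--     if L <= 0:
--         return 0
--     return (width - 1) * L * (L - 1) + width * L - L * (L - 1) * (2 * L - 1) // 2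
-- ===== Notes on version B (the rewrite author's own statement) =====
-- stated objective: faster
-- what changed: Replaced the double loop (outer loop over layers, inner arithmetic-series sum) by a single closed-form polynomial formula in layers = (width+1)//2.
import Mathlib
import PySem

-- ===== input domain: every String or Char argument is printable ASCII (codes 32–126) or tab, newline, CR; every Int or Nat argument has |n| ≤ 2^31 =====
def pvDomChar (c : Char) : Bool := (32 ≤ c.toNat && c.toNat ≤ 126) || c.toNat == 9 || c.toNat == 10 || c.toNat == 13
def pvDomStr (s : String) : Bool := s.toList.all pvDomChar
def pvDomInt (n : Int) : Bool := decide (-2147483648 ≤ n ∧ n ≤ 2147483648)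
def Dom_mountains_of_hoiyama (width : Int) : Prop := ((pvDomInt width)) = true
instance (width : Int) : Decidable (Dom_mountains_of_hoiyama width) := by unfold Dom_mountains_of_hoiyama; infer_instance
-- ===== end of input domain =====

-- B replaces A's double loop by a closed-form polynomial in layers = (width+1)//2 (objective: faster, O(1) vs O(width^2)).

-- ===== PORT A =====
def mountains_of_hoiyama (width : Int) : Int :=
  let layers := PySem.Int.floordiv (width + 1) 2
  (PySem.List.pyRange 0 layers 1).foldl (fun total i =>
    let n := i
    let center := width - i
    let layer := (PySem.List.pyRange (center - n) (center + 1) 1).foldl (· + ·) 0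
    let layer_sum := layer * 2 - center
    total + layer_sum) 0

-- ===== PORT B =====
def mountains_of_hoiyama_alt (width : Int) : Int :=
  let L := PySem.Int.floordiv (width + 1) 2
  if L ≤ 0 then 0
  else (width - 1) * L * (L - 1) + width * L - PySem.Int.floordiv (L * (L - 1) * (2 * L - 1)) 2

-- ===== PRECONDITION & SPEC =====
def Spec_mountains_of_hoiyama (width : Int) (out : Int) : Prop := out = mountains_of_hoiyama_alt width
instance (width : Int) (out : Int) : Decidable (Spec_mountains_of_hoiyama width out) := by unfold Spec_mountains_of_hoiyama; infer_instance

-- ===== CLAIM (what is proved, stated in full; the proofs are below) =====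
def Claim_equal_mountains_of_hoiyama : Prop := ∀ (width : Int), Dom_mountains_of_hoiyama width → Spec_mountains_of_hoiyama width (mountains_of_hoiyama width)

-- ===== LEMMAS AND PROOFS =====

-- sum of the n consecutive integers a, a+1, …, a+n-1 (doubled, to stay in Int)
theorem pv_inner_sum (a : Int) : ∀ (n : Nat),
    2 * ((PySem.List.pyRange a (a + (n : Int)) 1).foldl (· + ·) 0) = (n : Int) * (2 * a + (n : Int) - 1) := by
  intro n
  induction n with
  | zero => simp [PySem.List.pyRange_one_eq_nil (le_refl a)]
  | succ n ih =>
    have h1 : a + ((n + 1 : Nat) : Int) = (a + (n : Int)) + 1 := by push_cast; ring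
    rw [h1, PySem.List.pyRange_one_succ_right (by omega : a ≤ a + (n : Int)), List.foldl_append]
    simp only [List.foldl_cons, List.foldl_nil]
    push_cast
    linear_combination ih

-- outer loop over k layers, in closed (doubled) form
theorem pv_outer_sum (w : Int) : ∀ (k : Nat),
    2 * ((PySem.List.pyRange 0 (k : Int) 1).foldl (fun total i =>
        total + (((PySem.List.pyRange (w - i - i) (w - i + 1) 1).foldl (· + ·) 0) * 2 - (w - i))) 0)
      = 2 * (w - 1) * (k : Int) * ((k : Int) - 1) + 2 * w * (k : Int)
        - (k : Int) * ((k : Int) - 1) * (2 * (k : Int) - 1) := by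
  intro k
  induction k with
  | zero => simp [PySem.List.pyRange_one_eq_nil (le_refl (0 : Int))]
  | succ k ih =>
    have h1 : ((k + 1 : Nat) : Int) = (k : Int) + 1 := by push_cast; ring
    rw [h1, PySem.List.pyRange_one_succ_right (by omega : (0 : Int) ≤ (k : Int)), List.foldl_append]
    simp only [List.foldl_cons, List.foldl_nil]
    have hin := pv_inner_sum (w - (k : Int) - (k : Int)) (k + 1)
    have h2 : (w - (k : Int) - (k : Int)) + ((k + 1 : Nat) : Int) = w - (k : Int) + 1 := by
      push_cast; ring
    rw [h2] at hin
    push_cast at hin ⊢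
    linear_combination ih + 2 * hin

-- ===== VERDICT (by name: the statement is the Claim_ definition above) =====
theorem mountains_of_hoiyama_spec : Claim_equal_mountains_of_hoiyama := by
  intro width _
  unfold Spec_mountains_of_hoiyama mountains_of_hoiyama mountains_of_hoiyama_alt
  dsimp only
  by_cases hneg : PySem.Int.floordiv (width + 1) 2 ≤ 0
  · rw [if_pos hneg, PySem.List.pyRange_one_eq_nil hneg]
    simp
  · rw [if_neg hneg]
    obtain ⟨k, hk⟩ : ∃ k : Nat, PySem.Int.floordiv (width + 1) 2 = (k : Int) :=
      ⟨_, (Int.toNat_of_nonneg (by omega)).symm⟩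
    rw [hk]
    have houter := pv_outer_sum width k
    obtain ⟨m, hm⟩ : ∃ m : Int, ((k : Int) - 1) * (k : Int) = m + m :=
      (Int.even_mul_succ_self ((k : Int) - 1)).imp (fun m h => by linarith [h])
    have hdiv : PySem.Int.floordiv ((k : Int) * ((k : Int) - 1) * (2 * (k : Int) - 1)) 2
        = m * (2 * (k : Int) - 1) := by
      rw [PySem.Int.floordiv_eq_ediv_of_pos (by norm_num)]
      have h2 : (k : Int) * ((k : Int) - 1) * (2 * (k : Int) - 1) = 2 * (m * (2 * (k : Int) - 1)) := by
        linear_combination (2 * (k : Int) - 1) * hm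
      rw [h2, Int.mul_ediv_cancel_left _ (by norm_num)]
    rw [hdiv]
    suffices h2 : 2 * ((PySem.List.pyRange 0 (k : Int) 1).foldl (fun total i =>
        total + (((PySem.List.pyRange (width - i - i) (width - i + 1) 1).foldl (· + ·) 0) * 2 - (width - i))) 0)
      = 2 * ((width - 1) * (k : Int) * ((k : Int) - 1) + width * (k : Int) - m * (2 * (k : Int) - 1)) by
      linarith
    linear_combination houter - (2 * (k : Int) - 1) * hm
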